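-- pv_equiv track=rewrite | github.com/joseap9/courses | versionsCompare/PEPSI.py | extraer_ruts_concatenados
-- ===== SOURCE A (Python) =====
-- def formatear_rut(rut):
--     rut = rut.lstrip('0')
--     if len(rut) < 2:
--         return rut
--     return rut[:-1] + '-' + rut[-1]
--
-- def extraer_ruts_concatenados(cadena):
--     cadena = cadena.lstrip('0')
--     for i in range(2, len(cadena)-1):
--         rut1_raw = cadena[:i]
--         rut2_raw = cadena[i:]
--         if len(rut1_raw) >= 2 and len(rut2_raw) >= 2:
--             rut1 = formatear_rut(rut1_raw)
--             rut2 = formatear_rut(rut2_raw)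
--             return rut1, rut2
--     return None, None
-- ===== SOURCE B (Python) =====
-- def formatear_rut(rut):
--     rut = rut.lstrip('0')
--     if len(rut) < 2:
--         return rut
--     return rut[:-1] + '-' + rut[-1]
--
-- def extraer_ruts_concatenados(cadena):
--     cadena = cadena.lstrip('0')
--     if len(cadena) < 4:
--         return None, None
--     # after lstrip('0') the first char is not '0', so the two-char prefix
--     # formats directly as c0-c1; only the remainder may need zero-stripping
--     return cadena[0] + '-' + cadena[1], formatear_rut(cadena[2:])
-- ===== Notes on version B (the rewrite author's own statement) =====
-- stated objective: simpler
-- what changed: Replaces the scanning for-loop with a direct closed-form split: the loop always returns at its first index i=2 whenever the zero-stripped string has length >= 4, so B guards on len >= 4, builds the first RUT directly from the first two characters (which cannot start with '0' after the strip), and formats only the remainder.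
import Mathlib
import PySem

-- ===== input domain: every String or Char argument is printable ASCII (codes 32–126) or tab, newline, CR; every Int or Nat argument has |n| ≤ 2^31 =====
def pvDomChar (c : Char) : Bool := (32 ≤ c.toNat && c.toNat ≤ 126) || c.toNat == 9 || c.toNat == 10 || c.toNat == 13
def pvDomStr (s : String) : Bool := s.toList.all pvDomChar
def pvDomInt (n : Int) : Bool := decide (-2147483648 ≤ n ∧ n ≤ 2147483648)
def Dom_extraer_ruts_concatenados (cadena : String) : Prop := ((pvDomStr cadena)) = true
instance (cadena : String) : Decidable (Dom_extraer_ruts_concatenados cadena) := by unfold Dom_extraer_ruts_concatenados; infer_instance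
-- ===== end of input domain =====

-- B replaces A's scanning for-loop (which always returns at its first index) by a direct
-- closed-form split guarded on length >= 4; objective: simpler.

-- ===== PORT A =====
-- rut.lstrip('0') is ported as List.dropWhile (· == '0') — exact for a single-char strip set.
def fmtA (rut : List Char) : List Char :=
  let rut := rut.dropWhile (· == '0')
  if rut.length < 2 then rut
  else PySem.List.slice rut none (some (-1)) ++ '-' :: (PySem.List.pyGet? rut (-1)).toList

def goA (cs : List Char) : List Int → Option String × Option String
  | [] => (none, none)
  | i :: rest =>
      let rut1_raw := PySem.List.slice cs none (some i)
      let rut2_raw := PySem.List.slice cs (some i) none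
      if 2 ≤ rut1_raw.length ∧ 2 ≤ rut2_raw.length then
        (some (String.mk (fmtA rut1_raw)), some (String.mk (fmtA rut2_raw)))
      else goA cs rest

def extraer_ruts_concatenados (cadena : String) : Option String × Option String :=
  let cs := cadena.toList.dropWhile (· == '0')
  goA cs (PySem.List.pyRange 2 (PySem.Chars.len cs - 1))

-- ===== PORT B =====
def fmtB (rut : List Char) : List Char :=
  let rut := rut.dropWhile (· == '0')
  if rut.length < 2 then rut
  else PySem.List.slice rut none (some (-1)) ++ '-' :: (PySem.List.pyGet? rut (-1)).toList

def extraer_ruts_concatenados_alt (cadena : String) : Option String × Option String :=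
  let cs := cadena.toList.dropWhile (· == '0')
  if cs.length < 4 then (none, none)
  else
    match PySem.List.pyGet? cs 0, PySem.List.pyGet? cs 1 with
    | some a, some b =>
        (some (String.mk [a, '-', b]),
         some (String.mk (fmtB (PySem.List.slice cs (some 2) none))))
    | _, _ => (none, none)   -- unreachable: cs.length ≥ 4

-- ===== PRECONDITION & SPEC =====
def Spec_extraer_ruts_concatenados (cadena : String) (out : Option String × Option String) : Prop := out = extraer_ruts_concatenados_alt cadena
instance (cadena : String) (out : Option String × Option String) : Decidable (Spec_extraer_ruts_concatenados cadena out) := by unfold Spec_extraer_ruts_concatenados; infer_instance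

-- ===== CLAIM (what is proved, stated in full; the proofs are below) =====
def Claim_equal_extraer_ruts_concatenados : Prop := ∀ (cadena : String), Dom_extraer_ruts_concatenados cadena → Spec_extraer_ruts_concatenados cadena (extraer_ruts_concatenados cadena)

-- ===== LEMMAS AND PROOFS =====

theorem fmtA_eq_fmtB : fmtA = fmtB := rfl

theorem head_dropWhile_zero (l : List Char) :
    ∀ x, ((l.dropWhile (· == '0')).head? = some x) → (x == '0') = false := by
  induction l with
  | nil => intro x h; simp at h
  | cons c t ih =>
      intro x h
      cases hc : (c == '0') with
      | true => exact ih x (by simpa [List.dropWhile, hc] using h)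
      | false =>
          simp [List.dropWhile, hc] at h
          subst h
          exact hc

theorem core (cs : List Char)
    (h : ∀ x, cs.head? = some x → (x == '0') = false) :
    goA cs (PySem.List.pyRange 2 (PySem.Chars.len cs - 1)) =
      (if cs.length < 4 then (none, none)
       else
         match PySem.List.pyGet? cs 0, PySem.List.pyGet? cs 1 with
         | some a, some b =>
             (some (String.mk [a, '-', b]),
              some (String.mk (fmtB (PySem.List.slice cs (some 2) none))))
         | _, _ => (none, none)) := by
  match cs with
  | [] => decide
  | [c0] =>
      rw [show PySem.Chars.len [c0] - 1 = 0 from by simp [PySem.Chars.len],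
          show PySem.List.pyRange 2 0 = [] from by decide]
      simp [goA]
  | [c0, c1] =>
      rw [show PySem.Chars.len [c0, c1] - 1 = 1 from by simp [PySem.Chars.len],
          show PySem.List.pyRange 2 1 = [] from by decide]
      simp [goA]
  | [c0, c1, c2] =>
      rw [show PySem.Chars.len [c0, c1, c2] - 1 = 2 from by simp [PySem.Chars.len],
          show PySem.List.pyRange 2 2 = [] from by decide]
      simp [goA]
  | c0 :: c1 :: c2 :: c3 :: rest =>
      have h0 : (c0 == '0') = false := h c0 rfl
      have hlen : PySem.Chars.len (c0 :: c1 :: c2 :: c3 :: rest) - 1 =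
          ((rest.length : Int) + 3) := by
        simp [PySem.Chars.len]; ring
      rw [hlen, PySem.List.pyRange_one_cons (by omega)]
      have hs1 : PySem.List.slice (c0 :: c1 :: c2 :: c3 :: rest) none (some 2) = [c0, c1] := by
        rw [PySem.List.slice_to _ (by norm_num)]; rfl
      have hs2 : PySem.List.slice (c0 :: c1 :: c2 :: c3 :: rest) (some 2) none =
          c2 :: c3 :: rest := by
        rw [PySem.List.slice_from _ (by norm_num)]; rfl
      simp only [goA, hs1, hs2]
      rw [if_pos (by simp)]
      have hfmt1 : fmtA [c0, c1] = [c0, '-', c1] := by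
        simp [fmtA, List.dropWhile, h0, PySem.List.slice_to_neg_one, PySem.List.pyGet?_neg_one]
      have h4 : ¬ (c0 :: c1 :: c2 :: c3 :: rest).length < 4 := by simp
      have hg1 : PySem.List.pyGet? (c0 :: c1 :: c2 :: c3 :: rest) 1 = some c1 := by
        simp [PySem.List.pyGet?, PySem.List.pyIdx?,
          show (0:Int) ≤ (rest.length:Int) + 1 + 1 from by omega]
      rw [hfmt1, fmtA_eq_fmtB, if_neg h4, PySem.List.pyGet?_zero_cons, hg1]

-- ===== VERDICT (by name: the statement is the Claim_ definition above) =====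
theorem extraer_ruts_concatenados_spec : Claim_equal_extraer_ruts_concatenados := by
  intro cadena _
  unfold Spec_extraer_ruts_concatenados extraer_ruts_concatenados extraer_ruts_concatenados_alt
  exact core _ (head_dropWhile_zero cadena.toList)
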